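-- pv_equiv track=rewrite | github.com/Pythagus/splunk-http-injections | http-injections-app/bin/injection/patterns.py | _transform_rules
-- ===== SOURCE A (Python) =====
-- def _transform_rules(rules):
--     new_rules = {}
--
--     for rule_id in rules:
--         rule = rules[rule_id]
--
--         if rule["type"] not in new_rules:
--             new_rules[rule["type"]] = {}
--
--         new_rules[rule["type"]][rule_id] = rule["rule"]
--
--     return new_rules
-- ===== SOURCE B (Python) =====
-- def _transform_rules(rules):
--     types = list(dict.fromkeys(r["type"] for r in rules.values()))
--     return {t: {rid: r["rule"] for rid, r in rules.items() if r["type"] == t}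
--             for t in types}
-- ===== Notes on version B (the rewrite author's own statement) =====
-- stated objective: alternative
-- what changed: A buckets rules into a nested dict in one mutating pass; B first collects the distinct types in order of first appearance, then builds each type's inner dict with a dict comprehension filtering the rules, assembling the result in one outer comprehension with no mutation.
import Mathlib
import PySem

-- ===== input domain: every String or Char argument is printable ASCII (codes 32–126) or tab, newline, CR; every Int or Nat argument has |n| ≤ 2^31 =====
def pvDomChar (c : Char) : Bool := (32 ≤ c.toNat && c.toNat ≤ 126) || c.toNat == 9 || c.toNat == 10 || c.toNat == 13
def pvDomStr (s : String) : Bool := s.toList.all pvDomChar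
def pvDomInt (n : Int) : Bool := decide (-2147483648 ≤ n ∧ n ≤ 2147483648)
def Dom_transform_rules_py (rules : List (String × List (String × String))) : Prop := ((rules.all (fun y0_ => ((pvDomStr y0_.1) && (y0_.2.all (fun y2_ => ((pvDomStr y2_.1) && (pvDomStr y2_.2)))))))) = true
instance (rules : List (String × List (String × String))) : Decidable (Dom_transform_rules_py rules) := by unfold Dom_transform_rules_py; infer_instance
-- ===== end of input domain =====

-- B replaces A's one-pass mutating bucketing with a two-phase, comprehension-style build
-- (distinct types first, then one filtered inner dict per type); objective: alternative, not faster.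

-- ===== PORT A =====
-- first-match association lookup (dict subscript / `in` test on a dict)
def pvFindVal {β : Type} (d : List (String × β)) (k : String) : Option β :=
  (d.find? (fun q => q.1 == k)).map (·.2)

-- `inner[k] = v`: overwrite in place if present, else append
def pvSetKey (d : List (String × String)) (k v : String) : List (String × String) :=
  if (pvFindVal d k).isSome then d.map (fun q => if q.1 == k then (k, v) else q)
  else d ++ [(k, v)]

def transform_rules_py (rules : List (String × List (String × String))) : List (String × List (String × String)) :=
  rules.foldl (fun new_rules p =>
    let rule := (pvFindVal rules p.1).getD []          -- rule = rules[rule_id]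
    let t := (pvFindVal rule "type").getD ""           -- rule["type"]
    let nr := if (pvFindVal new_rules t).isSome then new_rules
              else new_rules ++ [(t, [])]              -- new_rules[t] = {}
    -- new_rules[t][rule_id] = rule["rule"]
    nr.map (fun q => if q.1 == t then (q.1, pvSetKey q.2 p.1 ((pvFindVal rule "rule").getD "")) else q)) []

-- ===== PORT B =====
def pvTy (r : List (String × String)) : String := (pvFindVal r "type").getD ""
def pvRu (r : List (String × String)) : String := (pvFindVal r "rule").getD ""

-- types = list(dict.fromkeys(r["type"] for r in rules.values()))
def pvTypes (rules : List (String × List (String × String))) : List String :=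
  rules.foldl (fun acc p => PySem.Set.add acc (pvTy p.2)) []

-- {rid: r["rule"] for rid, r in rules.items() if r["type"] == t}
def pvGroup (rules : List (String × List (String × String))) (t : String) : List (String × String) :=
  (rules.filter (fun p => pvTy p.2 == t)).map (fun p => (p.1, pvRu p.2))

def transform_rules_py_alt (rules : List (String × List (String × String))) : List (String × List (String × String)) :=
  (pvTypes rules).map (fun t => (t, pvGroup rules t))

-- ===== PRECONDITION & SPEC =====
-- Pre_ requires every inner dict to carry the keys "type" and "rule" (Python A raises KeyError
-- otherwise) and all key lists to be duplicate-free: an association list with a repeated key does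
-- not denote a Python dict (dict construction collapses duplicates before A ever runs).
def Pre_transform_rules_py (rules : List (String × List (String × String))) : Prop :=
  (rules.map Prod.fst).Nodup ∧
  ∀ p ∈ rules, (p.2.map Prod.fst).Nodup ∧ "type" ∈ p.2.map Prod.fst ∧ "rule" ∈ p.2.map Prod.fst
instance (rules : List (String × List (String × String))) : Decidable (Pre_transform_rules_py rules) := by unfold Pre_transform_rules_py; infer_instance

def pvWitness_transform_rules_py : (List (String × List (String × String))) :=
  [("r1", [("type", "sqli"), ("rule", "x=1")]), ("r2", [("type", "xss"), ("rule", "<s>")])]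

def Spec_transform_rules_py (rules : List (String × List (String × String))) (out : List (String × List (String × String))) : Prop := out = transform_rules_py_alt rules
instance (rules : List (String × List (String × String))) (out : List (String × List (String × String))) : Decidable (Spec_transform_rules_py rules out) := by unfold Spec_transform_rules_py; infer_instance

-- ===== CLAIM (what is proved, stated in full; the proofs are below) =====
def Claim_equal_transform_rules_py : Prop := ∀ (rules : List (String × List (String × String))), Dom_transform_rules_py rules → Pre_transform_rules_py rules → Spec_transform_rules_py rules (transform_rules_py rules)

-- ===== LEMMAS AND PROOFS =====

-- the A-step with the self-lookup already resolved to the pair's own value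
def pvStep (nr : List (String × List (String × String))) (p : String × List (String × String)) : List (String × List (String × String)) :=
  let t := pvTy p.2
  let nr' := if (pvFindVal nr t).isSome then nr else nr ++ [(t, [])]
  nr'.map (fun q => if q.1 == t then (q.1, pvSetKey q.2 p.1 (pvRu p.2)) else q)

theorem pvFindVal_self {β : Type} (rules : List (String × β))
    (h : (rules.map Prod.fst).Nodup) {p : String × β} (hp : p ∈ rules) :
    pvFindVal rules p.1 = some p.2 := by
  induction rules with
  | nil => cases hp
  | cons q rs ih =>
    simp only [List.map_cons, List.nodup_cons] at h
    rcases List.mem_cons.mp hp with rfl | hmem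
    · simp [pvFindVal]
    · have hne : ¬ ((q.1 == p.1) = true) := by
        simp only [beq_iff_eq]
        exact fun he => h.1 (he ▸ List.mem_map_of_mem hmem)
      unfold pvFindVal
      have hstep : List.find? (fun r => r.1 == p.1) (q :: rs) = List.find? (fun r => r.1 == p.1) rs :=
        List.find?_cons_of_neg hne
      rw [hstep]
      exact ih h.2 hmem

theorem pvFindVal_map_key (l : List String) (f : String → List (String × String)) (k : String) :
    pvFindVal (l.map (fun a => (a, f a))) k = if k ∈ l then some (f k) else none := by
  induction l with
  | nil => simp [pvFindVal]
  | cons a l ih =>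
    by_cases hak : a = k
    · subst hak; simp [pvFindVal]
    · have : (a == k) = false := by simp [hak]
      simp [pvFindVal, this, List.mem_cons, Ne.symm hak] at ih ⊢
      simpa [pvFindVal] using ih

theorem pvTypes_eq_ofList (rules : List (String × List (String × String))) :
    pvTypes rules = PySem.Set.ofList (rules.map (fun p => pvTy p.2)) := by
  unfold pvTypes
  rw [← PySem.Set.update_map_eq_foldl_add, PySem.Set.update_nil_left]

theorem mem_pvTypes {rules : List (String × List (String × String))} {t : String} :
    t ∈ pvTypes rules ↔ ∃ p ∈ rules, pvTy p.2 = t := by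
  rw [pvTypes_eq_ofList]
  simp [PySem.Set.mem_ofList, eq_comm]

theorem pvGroup_append (rules : List (String × List (String × String)))
    (p : String × List (String × String)) (t : String) :
    pvGroup (rules ++ [p]) t =
      pvGroup rules t ++ (if pvTy p.2 = t then [(p.1, pvRu p.2)] else []) := by
  unfold pvGroup
  rw [List.filter_append, List.map_append]
  congr 1
  by_cases h : pvTy p.2 = t <;> simp [h]

theorem pvGroup_eq_nil {rules : List (String × List (String × String))} {t : String}
    (h : t ∉ pvTypes rules) : pvGroup rules t = [] := by
  unfold pvGroup
  rw [List.filter_eq_nil_iff.mpr, List.map_nil]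
  intro p hp hbeq
  exact h (mem_pvTypes.mpr ⟨p, hp, by simpa using hbeq⟩)

theorem keys_pvGroup_sub {rules : List (String × List (String × String))} {t k : String}
    (h : k ∈ (pvGroup rules t).map Prod.fst) : k ∈ rules.map Prod.fst := by
  simp only [pvGroup, List.map_map, List.mem_map, Function.comp] at h
  rcases h with ⟨p, hp, hk⟩
  exact List.mem_map.mpr ⟨p, List.mem_of_mem_filter hp, hk⟩

theorem pvSetKey_fresh (d : List (String × String)) (k v : String)
    (h : k ∉ d.map Prod.fst) : pvSetKey d k v = d ++ [(k, v)] := by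
  have hfind : d.find? (fun q => q.1 == k) = none := by
    apply List.find?_eq_none.mpr
    intro q hq hbeq
    exact h (List.mem_map.mpr ⟨q, hq, by simpa using hbeq⟩)
  simp [pvSetKey, pvFindVal, hfind]

theorem pvFold_eq_alt (rules : List (String × List (String × String)))
    (h : (rules.map Prod.fst).Nodup) :
    rules.foldl pvStep [] = (pvTypes rules).map (fun t => (t, pvGroup rules t)) := by
  induction rules using List.reverseRecOn with
  | nil => simp [pvTypes, pvGroup]
  | append_singleton rs p ih =>
    have hnd : (rs.map Prod.fst).Nodup := by
      rw [List.map_append] at h; exact (List.nodup_append.mp h).1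
    have hfresh : p.1 ∉ rs.map Prod.fst := by
      intro hmem
      rw [List.map_append, List.nodup_append] at h
      exact h.2.2 p.1 hmem p.1 (by simp) rfl
    rw [List.foldl_append, ih hnd, List.foldl_cons, List.foldl_nil]
    have htypes : pvTypes (rs ++ [p]) = PySem.Set.add (pvTypes rs) (pvTy p.2) := by
      unfold pvTypes; rw [List.foldl_append, List.foldl_cons, List.foldl_nil]
    have hfind : pvFindVal ((pvTypes rs).map (fun t => (t, pvGroup rs t))) (pvTy p.2) =
        if pvTy p.2 ∈ pvTypes rs then some (pvGroup rs (pvTy p.2)) else none :=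
      pvFindVal_map_key _ _ _
    by_cases hmem : pvTy p.2 ∈ pvTypes rs
    · -- type already present: its inner dict gets the new pair appended
      rw [htypes, PySem.Set.add_of_mem hmem]
      unfold pvStep
      simp only [hfind, hmem, if_pos, Option.isSome_some, List.map_map]
      apply List.map_congr_left
      intro t ht
      simp only [Function.comp_apply]
      rw [pvGroup_append]
      by_cases hteq : t = pvTy p.2
      · have hfr : p.1 ∉ (pvGroup rs (pvTy p.2)).map Prod.fst :=
          fun hc => hfresh (keys_pvGroup_sub hc)
        rw [hteq]
        simp [pvSetKey_fresh _ _ _ hfr]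
      · have hb : (t == pvTy p.2) = false := by simp [hteq]
        have hb2 : pvTy p.2 ≠ t := fun he => hteq he.symm
        simp [hb, hb2]
    · -- new type: a fresh singleton bucket is appended
      rw [htypes, PySem.Set.add_of_not_mem hmem]
      unfold pvStep
      simp only [hfind, hmem, Option.isSome_none, Bool.false_eq_true, if_false, List.map_append,
        List.map_map]
      congr 1
      · apply List.map_congr_left
        intro t ht
        have hteq : t ≠ pvTy p.2 := fun he => hmem (he ▸ ht)
        have hb : (t == pvTy p.2) = false := by simp [hteq]
        have hb2 : pvTy p.2 ≠ t := fun he => hteq he.symm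
        simp only [Function.comp_apply, hb, Bool.false_eq_true, if_false]
        rw [pvGroup_append]
        simp [hb2]
      · have h0 : pvGroup rs (pvTy p.2) = [] := pvGroup_eq_nil hmem
        simp [pvSetKey, pvFindVal, pvGroup_append, h0]

-- ===== VERDICT (by name: the statement is the Claim_ definition above) =====
theorem transform_rules_py_spec : Claim_equal_transform_rules_py := by
  intro rules _ hpre
  unfold Spec_transform_rules_py transform_rules_py transform_rules_py_alt
  have hstep : rules.foldl (fun new_rules p =>
      let rule := (pvFindVal rules p.1).getD []
      let t := (pvFindVal rule "type").getD ""
      let nr := if (pvFindVal new_rules t).isSome then new_rules else new_rules ++ [(t, [])]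
      nr.map (fun q => if q.1 == t then (q.1, pvSetKey q.2 p.1 ((pvFindVal rule "rule").getD "")) else q)) [] =
      rules.foldl pvStep [] := by
    apply PySem.List.foldl_congr_mem
    intro acc p hp
    have := pvFindVal_self rules hpre.1 hp
    simp only [this, Option.getD_some]
    rfl
  rw [hstep, pvFold_eq_alt rules hpre.1]
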